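-- pv_equiv track=rewrite | github.com/tdmvu-mettadepth/gitingest-tdmvu | app/services/mapper.py | rearrange_columns
-- ===== SOURCE A (Python) =====
-- def rearrange_columns(columns, required_columns):
--     ordered_columns = []
--     remaining_columns = []
--
--     for col in columns:
--         if col in required_columns:
--             ordered_columns.append(col)
--         else:
--             remaining_columns.append(col)
--     ordered_column = ordered_columns + remaining_columns
--     return ordered_column
-- ===== SOURCE B (Python) =====
-- def rearrange_columns(columns, required_columns):
--     return sorted(columns, key=lambda c: c not in required_columns)
-- ===== Notes on version B (the rewrite author's own statement) =====
-- stated objective: idiomatic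
-- what changed: Replaced the two-bucket accumulate-then-concatenate loop with a single stable sort on the boolean key 'c not in required_columns', which keeps required columns first in original order.
import Mathlib
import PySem

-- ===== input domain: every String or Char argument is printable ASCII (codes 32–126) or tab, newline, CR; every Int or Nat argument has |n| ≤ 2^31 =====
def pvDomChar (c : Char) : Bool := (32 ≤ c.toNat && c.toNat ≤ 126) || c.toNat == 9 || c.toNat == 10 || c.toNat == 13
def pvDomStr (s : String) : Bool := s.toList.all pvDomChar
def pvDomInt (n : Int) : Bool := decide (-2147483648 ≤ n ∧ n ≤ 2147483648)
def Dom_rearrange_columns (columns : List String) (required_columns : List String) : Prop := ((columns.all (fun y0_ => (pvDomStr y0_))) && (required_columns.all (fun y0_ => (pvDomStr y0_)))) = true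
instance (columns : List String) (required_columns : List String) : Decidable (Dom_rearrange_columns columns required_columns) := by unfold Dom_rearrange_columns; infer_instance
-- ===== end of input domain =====

-- ===== PORT A =====
-- A: two accumulator lists (required first, then the rest), concatenated at the end.
def rearrange_columns (columns : List String) (required_columns : List String) : List String :=
  let p := columns.foldl
    (fun (acc : List String × List String) col =>
      if required_columns.contains col then (acc.1 ++ [col], acc.2)
      else (acc.1, acc.2 ++ [col]))
    ([], [])
  p.1 ++ p.2

-- ===== PORT B =====
-- B: one stable sort on the boolean key "c not in required_columns" (idiomatic rewrite).
def rearrange_columns_alt (columns : List String) (required_columns : List String) : List String :=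
  PySem.List.sorted columns (fun c => !(required_columns.contains c)) false

-- ===== PRECONDITION & SPEC =====
def Spec_rearrange_columns (columns : List String) (required_columns : List String) (out : List String) : Prop := out = rearrange_columns_alt columns required_columns
instance (columns : List String) (required_columns : List String) (out : List String) : Decidable (Spec_rearrange_columns columns required_columns out) := by unfold Spec_rearrange_columns; infer_instance

-- ===== CLAIM (what is proved, stated in full; the proofs are below) =====
def Claim_equal_rearrange_columns : Prop := ∀ (columns : List String) (required_columns : List String), Dom_rearrange_columns columns required_columns → Spec_rearrange_columns columns required_columns (rearrange_columns columns required_columns)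

-- ===== LEMMAS AND PROOFS =====

-- inserting x into a list that is "all-false keys ++ all-true keys" keeps the shape (stability step)
theorem pv_insertBy_bool {α : Type} (key : α → Bool) (x : α) (F T : List α)
    (hF : ∀ y ∈ F, key y = false) (hT : ∀ y ∈ T, key y = true) :
    PySem.List.insertBy (fun a b => decide (key a < key b)) x (F ++ T)
      = if key x then F ++ T ++ [x] else F ++ x :: T := by
  induction F with
  | nil =>
    simp only [List.nil_append]
    induction T with
    | nil => cases hx : key x <;> simp [PySem.List.insertBy]
    | cons t ts ih =>
      have ht : key t = true := hT t (by simp)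
      have ih' := ih (fun y hy => hT y (by simp [hy]))
      cases hx : key x with
      | false => simp [PySem.List.insertBy, ht, hx, Bool.lt_iff]
      | true =>
        simp only [hx] at ih'
        simp only [PySem.List.insertBy, ht, hx, Bool.lt_iff]
        simpa [Bool.lt_iff] using ih'
  | cons f fs ih =>
    have hf : key f = false := hF f (by simp)
    have ih' := ih (fun y hy => hF y (by simp [hy]))
    cases hx : key x with
    | false =>
      simp only [hx, if_neg (by decide : ¬ (false = true))] at ih'
      simp [PySem.List.insertBy, hf, hx, Bool.lt_iff]
      simpa [Bool.lt_iff] using ih'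
    | true =>
      simp only [hx] at ih'
      simp [PySem.List.insertBy, hf, Bool.lt_iff]
      simpa [Bool.lt_iff] using ih'

-- the insertion-sort fold over a boolean key produces "false-key elements ++ true-key elements", stably
theorem pv_foldl_insertBy_bool {α : Type} (key : α → Bool) :
    ∀ (xs F T : List α), (∀ y ∈ F, key y = false) → (∀ y ∈ T, key y = true) →
    xs.foldl (fun acc x => PySem.List.insertBy (fun a b => decide (key a < key b)) x acc) (F ++ T)
      = (F ++ xs.filter (fun x => !(key x))) ++ (T ++ xs.filter key) := by
  intro xs
  induction xs with
  | nil => intro F T _ _; simp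
  | cons x xs ih =>
    intro F T hF hT
    simp only [List.foldl_cons]
    rw [pv_insertBy_bool key x F T hF hT]
    cases hx : key x with
    | false =>
      have : F ++ x :: T = (F ++ [x]) ++ T := by simp
      rw [if_neg (by simp), this, ih (F ++ [x]) T
        (by intro y hy; rcases List.mem_append.mp hy with h | h
            · exact hF y h
            · simp at h; subst h; exact hx) hT]
      simp [hx]
    | true =>
      have : F ++ T ++ [x] = F ++ (T ++ [x]) := by simp
      rw [if_pos rfl, this, ih F (T ++ [x]) hF
        (by intro y hy; rcases List.mem_append.mp hy with h | h
            · exact hT y h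
            · simp at h; subst h; exact hx)]
      simp [hx]

-- A's fold splits the input into the two filtered sublists
theorem pv_foldlA (required_columns : List String) :
    ∀ (xs : List String) (o r : List String),
    xs.foldl (fun (acc : List String × List String) col =>
        if required_columns.contains col then (acc.1 ++ [col], acc.2)
        else (acc.1, acc.2 ++ [col])) (o, r)
      = (o ++ xs.filter (fun c => required_columns.contains c),
         r ++ xs.filter (fun c => !(required_columns.contains c))) := by
  intro xs
  induction xs with
  | nil => intro o r; simp
  | cons x xs ih =>
    intro o r
    simp only [List.foldl_cons]
    by_cases hx : required_columns.contains x = true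
    · have hx' : x ∈ required_columns := by simpa using hx
      rw [if_pos hx, ih, List.filter_cons, List.filter_cons]
      simp [hx']
    · rw [if_neg hx, ih, List.filter_cons, List.filter_cons]
      simp only [Bool.not_eq_true] at hx
      have hx' : x ∉ required_columns := by simpa using hx
      simp [hx']

-- ===== VERDICT (by name: the statement is the Claim_ definition above) =====
theorem rearrange_columns_spec : Claim_equal_rearrange_columns := by
  intro columns required_columns _
  unfold Spec_rearrange_columns rearrange_columns rearrange_columns_alt PySem.List.sorted
  simp only [if_neg (by decide : ¬ (false = true))]
  have hB := pv_foldl_insertBy_bool (fun c => !(required_columns.contains c)) columns [] []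
    (by simp) (by simp)
  simp only [List.nil_append, List.append_nil] at hB
  rw [hB, pv_foldlA required_columns columns [] []]
  simp
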